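-- pv_equiv track=rewrite | github.com/Ersildan/CoursePython-3 | I Модуль 10 Итераторы и генераторы/Задачи на Генераторы/task_41.py | pairwise
-- ===== SOURCE A (Python) =====
-- def pairwise(iterable):
--     it = iter(iterable)
--     n = next(it, None) # Получаем первый элемент или None, если iterable пуст
--
--     if n is None: return  # Проверяем, пустой ли список выходим из функции, ничего не генерируя
--
--     for el in it:
--         yield n, el
--         n = el
--
--     yield n, None # Добавляем последнюю пару
-- ===== SOURCE B (Python) =====
-- def pairwise(iterable):
--     xs = list(iterable)
--     if xs:
--         yield from zip(xs, xs[1:] + [None])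
-- ===== Notes on version B (the rewrite author's own statement) =====
-- stated objective: idiomatic
-- what changed: Replaces the explicit running-previous loop with materialising the input once and zipping it against its own tail extended by None.
import Mathlib
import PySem

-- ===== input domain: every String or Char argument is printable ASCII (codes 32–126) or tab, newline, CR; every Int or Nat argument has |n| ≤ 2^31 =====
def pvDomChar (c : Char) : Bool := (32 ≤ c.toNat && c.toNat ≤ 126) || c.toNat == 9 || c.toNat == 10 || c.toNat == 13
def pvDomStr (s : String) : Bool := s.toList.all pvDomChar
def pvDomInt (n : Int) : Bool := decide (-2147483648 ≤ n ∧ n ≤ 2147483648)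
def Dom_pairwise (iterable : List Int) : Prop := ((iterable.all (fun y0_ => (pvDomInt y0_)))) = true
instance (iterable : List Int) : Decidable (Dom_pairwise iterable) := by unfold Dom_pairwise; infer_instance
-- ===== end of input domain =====

-- B replaces A's running-previous generator loop with zipping the list against its
-- tail extended by None (idiomatic; B materialises the input, equivalence is about the yielded sequence).
-- ===== PORT A =====
-- for-loop over the rest of the iterator, carrying the previous element n
def pairwiseLoop (n : Int) : List Int → List (Int × Option Int)
  | [] => [(n, none)]
  | el :: it => (n, some el) :: pairwiseLoop el it

def pairwise (iterable : List Int) : List (Int × Option Int) :=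
  match iterable with
  | [] => []                 -- next(it, None) is None: yield nothing
  | n :: it => pairwiseLoop n it

-- ===== PORT B =====
def pairwise_alt (iterable : List Int) : List (Int × Option Int) :=
  let xs := iterable
  if xs.isEmpty then []
  else xs.zip (((xs.drop 1).map some) ++ [none])

-- ===== PRECONDITION & SPEC =====
def Spec_pairwise (iterable : List Int) (out : List (Int × Option Int)) : Prop := out = pairwise_alt iterable
instance (iterable : List Int) (out : List (Int × Option Int)) : Decidable (Spec_pairwise iterable out) := by unfold Spec_pairwise; infer_instance

-- ===== CLAIM (what is proved, stated in full; the proofs are below) =====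
def Claim_equal_pairwise : Prop := ∀ (iterable : List Int), Dom_pairwise iterable → Spec_pairwise iterable (pairwise iterable)

-- ===== LEMMAS AND PROOFS =====

-- ===== VERDICT (by name: the statement is the Claim_ definition above) =====
lemma pairwiseLoop_eq_zip (n : Int) (it : List Int) :
    pairwiseLoop n it = (n :: it).zip ((it.map some) ++ [none]) := by
  induction it generalizing n with
  | nil => simp [pairwiseLoop]
  | cons e rest ih => simp [pairwiseLoop, ih e, List.zip]

theorem pairwise_spec : Claim_equal_pairwise := by
  intro iterable _
  unfold Spec_pairwise pairwise pairwise_alt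
  cases iterable with
  | nil => rfl
  | cons n it => simp [pairwiseLoop_eq_zip]
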